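-- pv_equiv track=rewrite | github.com/Janek21/Bioinfo_share_2Y_2T | JanI/Algorithms_Data_Structures/Exam_material/Trees/Subsets.py | subse
-- ===== SOURCE A (Python) =====
-- def subse(values, current_item, max_w, cand):
--     if current_item==-1:
--         if len(cand)<max_w:
--             return [cand]
--         else:
--             return list()
--     else:
--         sol=subse(values, current_item-1, max_w, cand)
--         res=subse(values, current_item-1,
--                   max_w+1,
--                   cand+[values[current_item]])
--         return sol+res
-- ===== SOURCE B (Python) =====
-- def subse(values, current_item, max_w, cand):
--     if len(cand) >= max_w:
--         return []
--     subsets = [[]]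
--     for i in range(current_item + 1):
--         subsets = subsets + [[values[i]] + s for s in subsets]
--     return [cand + s for s in subsets]
-- ===== Notes on version B (the rewrite author's own statement) =====
-- stated objective: alternative
-- what changed: Replaces A's branching recursion (which rebuilds prefixes down two recursive calls per item) by one early return for the len(cand)>=max_w case plus a single iterative doubling loop that builds the subset list bottom-up.
import Mathlib
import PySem

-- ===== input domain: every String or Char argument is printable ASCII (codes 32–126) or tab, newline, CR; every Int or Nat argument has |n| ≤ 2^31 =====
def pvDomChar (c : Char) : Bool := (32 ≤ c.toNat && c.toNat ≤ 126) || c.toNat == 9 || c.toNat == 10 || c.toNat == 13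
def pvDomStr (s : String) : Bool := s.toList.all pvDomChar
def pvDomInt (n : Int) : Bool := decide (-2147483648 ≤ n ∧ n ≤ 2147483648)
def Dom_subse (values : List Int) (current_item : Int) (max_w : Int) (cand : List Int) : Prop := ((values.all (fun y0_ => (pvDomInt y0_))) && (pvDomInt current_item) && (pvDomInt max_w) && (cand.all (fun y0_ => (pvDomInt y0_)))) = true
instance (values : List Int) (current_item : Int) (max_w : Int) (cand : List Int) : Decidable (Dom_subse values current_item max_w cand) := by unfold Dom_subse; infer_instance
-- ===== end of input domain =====

-- B replaces A's two-way recursion by an early [] return plus one iterative doubling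
-- loop building the subsets bottom-up (objective: alternative, same cost).

-- ===== PORT A =====
-- A recurses on current_item down to -1; fuel = (current_item+1).toNat counts the levels.
-- The `none` branch is Python's IndexError (excluded by Pre_subse).
def subseGo (values : List Int) : Nat → Int → List Int → List (List Int)
  | 0, max_w, cand => if (cand.length : Int) < max_w then [cand] else []
  | n+1, max_w, cand =>
      let sol := subseGo values n max_w cand
      match PySem.List.pyGet? values (n : Int) with
      | some v => sol ++ subseGo values n (max_w + 1) (cand ++ [v])
      | none => sol

def subse (values : List Int) (current_item : Int) (max_w : Int) (cand : List Int) : List (List Int) :=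
  subseGo values (current_item + 1).toNat max_w cand

-- ===== PORT B =====
def subse_alt (values : List Int) (current_item : Int) (max_w : Int) (cand : List Int) : List (List Int) :=
  if max_w ≤ (cand.length : Int) then []
  else
    let subsets := (PySem.List.pyRange 0 (current_item + 1) 1).foldl
      (fun acc i => acc ++ acc.map (fun s => PySem.List.pyGetD values i 0 :: s)) [[]]
    subsets.map (fun s => cand ++ s)

-- ===== PRECONDITION & SPEC =====
-- Pre_ excludes current_item ≥ len(values) (A's IndexError at values[current_item])
-- and current_item < -1 (A recurses forever).
def Pre_subse (values : List Int) (current_item : Int) (max_w : Int) (cand : List Int) : Prop :=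
  -1 ≤ current_item ∧ current_item < (values.length : Int)
instance (values : List Int) (current_item : Int) (max_w : Int) (cand : List Int) : Decidable (Pre_subse values current_item max_w cand) := by unfold Pre_subse; infer_instance

def pvWitness_subse : List Int × Int × Int × List Int := ([1, 2], 1, 2, [])

def Spec_subse (values : List Int) (current_item : Int) (max_w : Int) (cand : List Int) (out : List (List Int)) : Prop := out = subse_alt values current_item max_w cand
instance (values : List Int) (current_item : Int) (max_w : Int) (cand : List Int) (out : List (List Int)) : Decidable (Spec_subse values current_item max_w cand out) := by unfold Spec_subse; infer_instance

-- ===== CLAIM (what is proved, stated in full; the proofs are below) =====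
def Claim_equal_subse : Prop := ∀ (values : List Int) (current_item : Int) (max_w : Int) (cand : List Int), Dom_subse values current_item max_w cand → Pre_subse values current_item max_w cand → Spec_subse values current_item max_w cand (subse values current_item max_w cand)


-- ===== LEMMAS AND PROOFS =====

-- B's doubling loop, in Nat-index form.
def powList (values : List Int) (n : Nat) : List (List Int) :=
  (List.range n).foldl (fun acc i => acc ++ acc.map (fun s => values.getD i 0 :: s)) [[]]

theorem subseGo_of_ge (values : List Int) :
    ∀ (n : Nat) (max_w : Int) (cand : List Int), max_w ≤ (cand.length : Int) →
    subseGo values n max_w cand = [] := by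
  intro n
  induction n with
  | zero => intro max_w cand h; simp [subseGo]; omega
  | succ n ih =>
      intro max_w cand h
      have h1 : max_w + 1 ≤ ((cand ++ [0]).length : Int) := by simp; omega
      simp only [subseGo]
      cases hg : PySem.List.pyGet? values (n : Int) with
      | none => simp [ih max_w cand h]
      | some v =>
          have h2 : max_w + 1 ≤ ((cand ++ [v]).length : Int) := by simp; omega
          simp [ih max_w cand h, ih (max_w + 1) (cand ++ [v]) h2]

theorem subseGo_eq_powList (values : List Int) :
    ∀ (n : Nat), n ≤ values.length → ∀ (max_w : Int) (cand : List Int),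
    (cand.length : Int) < max_w →
    subseGo values n max_w cand = (powList values n).map (fun s => cand ++ s) := by
  intro n
  induction n with
  | zero => intro _ max_w cand h; simp [subseGo, powList, h]
  | succ n ih =>
      intro hn max_w cand h
      have hlt : n < values.length := by omega
      have hg : PySem.List.pyGet? values (n : Int) = some values[n] := by
        simp [PySem.List.pyGet?_natCast, List.getElem?_eq_getElem hlt]
      have h2 : ((cand ++ [values[n]]).length : Int) < max_w + 1 := by simp; omega
      simp only [subseGo, hg]
      rw [ih (by omega) max_w cand h, ih (by omega) (max_w + 1) (cand ++ [values[n]]) h2]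
      have hv : values[n]?.getD 0 = values[n] := by
        simp [List.getElem?_eq_getElem hlt]
      have hP : powList values (n+1)
          = powList values n ++ (powList values n).map (fun s => values[n] :: s) := by
        simp [powList, List.range_succ, hv]
      rw [hP]
      simp [List.map_map, Function.comp]

-- ===== VERDICT (by name: the statement is the Claim_ definition above) =====
theorem subse_spec : Claim_equal_subse := by
  intro values current_item max_w cand _ hpre
  obtain ⟨h1, h2⟩ := hpre
  unfold Spec_subse subse subse_alt
  by_cases hc : max_w ≤ (cand.length : Int)
  · rw [if_pos hc]
    exact subseGo_of_ge values _ max_w cand hc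
  · rw [if_neg hc]
    have hfold : (PySem.List.pyRange 0 (current_item + 1) 1).foldl
        (fun acc i => acc ++ acc.map (fun s => PySem.List.pyGetD values i 0 :: s)) [[]]
        = powList values (current_item + 1).toNat := by
      rw [PySem.List.pyRange_one, List.foldl_map]
      simp [powList]
    rw [hfold]
    exact subseGo_eq_powList values _ (by omega) max_w cand (by omega)
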